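-- pv_equiv track=rewrite | github.com/mbolaris/tank | tests/test_no_concrete_entity_imports_in_infra.py | is_inside_type_checking_block
-- ===== SOURCE A (Python) =====
-- def is_inside_type_checking_block(content: str, match_pos: int) -> bool:
--     """Check if the match position is inside a TYPE_CHECKING block.
--
--     This is a heuristic check that looks for 'if TYPE_CHECKING:' before the match
--     and checks if the indentation suggests we're inside that block.
--     """
--     lines_before = content[:match_pos].split('\n')
--
--     # Look backwards for TYPE_CHECKING block
--     in_type_checking = False
--     for line in reversed(lines_before):
--         stripped = line.strip()
--         if stripped.startswith('if TYPE_CHECKING:'):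
--             in_type_checking = True
--             break
--         # If we hit a non-indented line (class, def, etc.), we're outside any block
--         if stripped and not line.startswith(' ') and not line.startswith('\t'):
--             if not stripped.startswith('#'):
--                 break
--
--     return in_type_checking
-- ===== SOURCE B (Python) =====
-- def is_inside_type_checking_block(content: str, match_pos: int) -> bool:
--     """Filter the prefix's lines to the 'significant' ones; the last kept line decides."""
--     def significant(line):
--         s = line.strip()
--         if s.startswith('if TYPE_CHECKING:'):
--             return True
--         return bool(s) and line[:1] not in (' ', '\t') and not s.startswith('#')
--     kept = [ln for ln in content[:match_pos].split('\n') if significant(ln)]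
--     if not kept:
--         return False
--     return kept[-1].strip().startswith('if TYPE_CHECKING:')
-- ===== Notes on version B (the rewrite author's own statement) =====
-- stated objective: alternative
-- what changed: B replaces A's reversed scan with early break by two staged passes: filter the prefix's lines to the significant ones, then classify the last kept line.
import Mathlib
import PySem

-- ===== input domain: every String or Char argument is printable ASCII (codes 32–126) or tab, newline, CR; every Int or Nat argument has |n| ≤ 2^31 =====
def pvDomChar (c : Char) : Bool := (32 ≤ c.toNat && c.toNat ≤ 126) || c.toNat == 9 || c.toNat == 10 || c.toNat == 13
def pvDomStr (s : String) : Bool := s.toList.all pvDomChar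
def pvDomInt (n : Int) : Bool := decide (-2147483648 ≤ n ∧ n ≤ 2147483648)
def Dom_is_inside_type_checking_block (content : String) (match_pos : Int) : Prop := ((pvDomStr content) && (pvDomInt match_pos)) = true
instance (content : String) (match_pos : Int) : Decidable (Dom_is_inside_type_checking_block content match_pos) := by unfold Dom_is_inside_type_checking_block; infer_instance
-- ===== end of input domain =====

-- B is an alternative decomposition (filter significant lines, classify the last); same cost.
-- ===== PORT A =====
-- Port of A: reversed-line scan with early break, transcribed as structural recursion on the reversed list.
def pvTC : List Char := "if TYPE_CHECKING:".toList

def pvGoA : List (List Char) → Bool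
  | [] => false
  | line :: rest =>
    let stripped := PySem.Chars.strip line
    if PySem.Chars.startswith stripped pvTC then true
    else if !stripped.isEmpty && !PySem.Chars.startswith line [' '] && !PySem.Chars.startswith line ['\t'] then
      if !PySem.Chars.startswith stripped ['#'] then false
      else pvGoA rest
    else pvGoA rest

def is_inside_type_checking_block (content : String) (match_pos : Int) : Bool :=
  pvGoA (PySem.Chars.splitOn (PySem.List.slice content.toList none (some match_pos)) ['\n']).reverse

-- ===== PORT B =====
-- Port of B: keep the significant lines, then the last kept line decides.
def pvTCB : List Char := "if TYPE_CHECKING:".toList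

def pvSignificant (line : List Char) : Bool :=
  let s := PySem.Chars.strip line
  if PySem.Chars.startswith s pvTCB then true
  else !s.isEmpty && !PySem.Chars.startswith line [' '] && !PySem.Chars.startswith line ['\t']
         && !PySem.Chars.startswith s ['#']

def is_inside_type_checking_block_alt (content : String) (match_pos : Int) : Bool :=
  let kept := (PySem.Chars.splitOn (PySem.List.slice content.toList none (some match_pos)) ['\n']).filter pvSignificant
  match kept.getLast? with
  | none => false
  | some l => PySem.Chars.startswith (PySem.Chars.strip l) pvTCB

-- ===== PRECONDITION & SPEC =====
def Spec_is_inside_type_checking_block (content : String) (match_pos : Int) (out : Bool) : Prop := out = is_inside_type_checking_block_alt content match_pos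
instance (content : String) (match_pos : Int) (out : Bool) : Decidable (Spec_is_inside_type_checking_block content match_pos out) := by unfold Spec_is_inside_type_checking_block; infer_instance

-- ===== CLAIM (what is proved, stated in full; the proofs are below) =====
def Claim_equal_is_inside_type_checking_block : Prop := ∀ (content : String) (match_pos : Int), Dom_is_inside_type_checking_block content match_pos → Spec_is_inside_type_checking_block content match_pos (is_inside_type_checking_block content match_pos)

-- ===== LEMMAS AND PROOFS =====
theorem pvGoA_eq_last_sig (ls : List (List Char)) :
    pvGoA ls.reverse =
      (match (ls.filter pvSignificant).getLast? with
       | none => false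
       | some l => PySem.Chars.startswith (PySem.Chars.strip l) pvTCB) := by
  induction ls using List.reverseRecOn with
  | nil => rfl
  | append_singleton ls x ih =>
    simp only [List.reverse_append, List.reverse_singleton, List.singleton_append,
      List.filter_append, List.filter_cons, List.filter_nil]
    by_cases hs : pvSignificant x = true
    · simp only [hs, if_true, List.getLast?_concat]
      -- pvGoA on x :: … decides from x alone, since x is significant
      simp only [pvGoA]
      unfold pvSignificant at hs
      by_cases h1 : PySem.Chars.startswith (PySem.Chars.strip x) pvTC = true <;>
        simp_all [pvTC, pvTCB]
    · simp only [hs, Bool.false_eq_true, if_false, List.append_nil, ← ih]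
      simp only [Bool.not_eq_true] at hs
      -- pvGoA skips the insignificant x
      simp only [pvGoA]
      unfold pvSignificant at hs
      by_cases h1 : PySem.Chars.startswith (PySem.Chars.strip x) pvTC = true <;>
        [simp_all [pvTC, pvTCB];
         (simp only [pvTCB, pvTC] at *; simp at hs ⊢;
          by_cases he : (PySem.Chars.strip x).isEmpty = true <;>
            cases hsp : PySem.Chars.startswith x [' '] <;>
            cases ht : PySem.Chars.startswith x ['\t'] <;>
            simp_all)]

-- ===== VERDICT (by name: the statement is the Claim_ definition above) =====
theorem is_inside_type_checking_block_spec : Claim_equal_is_inside_type_checking_block := by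
  intro content match_pos _
  unfold Spec_is_inside_type_checking_block is_inside_type_checking_block is_inside_type_checking_block_alt
  exact pvGoA_eq_last_sig _
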